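-- pv_equiv track=rewrite | github.com/pypi-data/pypi-mirror-325 | packages/parade-manage/parade_manage-0.0.2.9.tar.gz/parade_manage-0.0.2.9/parade_manage/utils.py | check
-- ===== SOURCE A (Python) =====
-- from collections import defaultdict
-- from typing import List, Type, Callable, Dict, Set, Tuple, Union
--
-- def find_cycles(graph: Dict[str, List[str] | Set[str]]) -> List[List[str]]:
--     visited = set()
--     recursion_stack = set()
--     cycles = []
--
--     def dfs(node, path):
--         if node in recursion_stack:
--             cycles.append(path + [node])
--             return
--
--         if node in visited:
--             return
--
--         visited.add(node)
--         recursion_stack.add(node)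
--
--         if node in graph:
--             for neighbor in graph[node]:
--                 dfs(neighbor, path + [node])
--
--         recursion_stack.remove(node)
--
--     for node in graph:
--         dfs(node, [])
--
--     return cycles
--
-- def check(tasks: Dict[str, List[str] | Set[str]]) -> Tuple[Dict, Dict, Dict, List]:
--
--     non_deps_tasks: Dict[str, Set[str]] = defaultdict(set)
--     duplicate_tasks: Dict[str, Set[Tuple[str, int]]] = defaultdict(set)
--     circular_tasks: List[List[str]] = find_cycles(tasks)
--
--     for task, deps in tasks.items():
--         for dp in deps:
--             # check for invalid dependencies
--             if dp not in tasks: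
--                 non_deps_tasks[task].add(dp)
--
--             # check for duplicate dependencies
--             if deps.count(dp) > 1:
--                 duplicate_tasks[task].add((dp, deps.count(dp)))
--
--     non_deps_tasks = {k: set(v) for k, v in non_deps_tasks.items()}
--     duplicate_tasks = {k: set(v) for k, v in duplicate_tasks.items()}
--
--     return tasks, non_deps_tasks, duplicate_tasks, circular_tasks
-- ===== SOURCE B (Python) =====
-- from collections import Counter
--
-- def find_cycles(graph):
--     # iterative DFS: explicit LIFO stack of ("enter", node, path) / ("leave", node)
--     # frames replaces the recursion; neighbors are pushed reversed so they are
--     # popped in the original order.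
--     visited = set()
--     recursion_stack = set()
--     cycles = []
--     for root in graph:
--         stack = [("enter", root, [])]
--         while stack:
--             op, node, path = stack.pop()
--             if op == "leave":
--                 recursion_stack.remove(node)
--             elif node in recursion_stack:
--                 cycles.append(path + [node])
--             elif node in visited:
--                 pass
--             else:
--                 visited.add(node)
--                 recursion_stack.add(node)
--                 stack.append(("leave", node, None))
--                 new_path = path + [node]
--                 if node in graph:
--                     for nb in reversed(list(graph[node])):
--                         stack.append(("enter", nb, new_path))
--     return cycles
--
-- def check(tasks):
--     # staged passes: one Counter per task built once, then dict comprehensions,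
--     # instead of a mutating defaultdict loop with repeated deps.count scans.
--     counts = {t: Counter(deps) for t, deps in tasks.items()}
--     non_deps = {t: {d for d in c if d not in tasks} for t, c in counts.items()}
--     non_deps = {t: v for t, v in non_deps.items() if v}
--     dups = {t: {(d, n) for d, n in c.items() if n > 1} for t, c in counts.items()}
--     dups = {t: v for t, v in dups.items() if v}
--     return tasks, non_deps, dups, find_cycles(tasks)
-- ===== Notes on version B (the rewrite author's own statement) =====
-- stated objective: alternative
-- what changed: find_cycles is rewritten as an iterative DFS over an explicit LIFO stack of enter/leave frames (neighbors pushed in reverse) instead of a recursive helper, and check is rewritten as staged dict comprehensions over one Counter per task instead of a mutating defaultdict loop with repeated deps.count scans; Pre_ excludes association lists with duplicate keys, which do not represent a Python dict input.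
import Mathlib
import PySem

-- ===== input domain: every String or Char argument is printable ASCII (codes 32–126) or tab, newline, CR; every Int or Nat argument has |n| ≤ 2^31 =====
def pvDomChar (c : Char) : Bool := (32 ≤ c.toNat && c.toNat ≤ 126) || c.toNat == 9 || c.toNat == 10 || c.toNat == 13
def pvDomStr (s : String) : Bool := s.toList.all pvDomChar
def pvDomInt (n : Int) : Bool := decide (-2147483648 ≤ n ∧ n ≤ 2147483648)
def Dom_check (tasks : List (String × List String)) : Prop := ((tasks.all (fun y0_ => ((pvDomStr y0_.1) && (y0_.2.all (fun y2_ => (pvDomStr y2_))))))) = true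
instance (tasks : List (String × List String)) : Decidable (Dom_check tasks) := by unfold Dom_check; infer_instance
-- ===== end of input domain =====

-- B replaces the recursive dfs by an explicit LIFO stack of enter/leave frames and the
-- mutating defaultdict loop with repeated deps.count scans by staged passes over one
-- Counter per task (objective: alternative, same measured cost).
-- ===== PORT A =====
-- recursive dfs of find_cycles; state = (visited, recursion_stack, cycles).
-- fuel is a totality device only: the initial fuel chosen in find_cycles exceeds any
-- reachable recursion depth, so the fuel-0 branch is never taken on the inputs run.
def dfsA (graph : List (String × List String)) (fuel : Nat) (node : String)
    (path : List String)
    (st : PySem.Set String × PySem.Set String × List (List String)) :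
    PySem.Set String × PySem.Set String × List (List String) :=
  match fuel with
  | 0 => st
  | fuel + 1 =>
    if PySem.Set.contains st.2.1 node then
      (st.1, st.2.1, st.2.2 ++ [path ++ [node]])
    else if PySem.Set.contains st.1 node then st
    else
      let st1 := (PySem.Set.add st.1 node, PySem.Set.add st.2.1 node, st.2.2)
      let st2 :=
        match (PySem.Dict.mk graph).get? node with   -- `if node in graph: for nb in graph[node]`
        | some nbs => nbs.foldl (fun s nb => dfsA graph fuel nb (path ++ [node]) s) st1
        | none => st1
      -- recursion_stack.remove(node): node is always present here, so remove = discard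
      (st2.1, PySem.Set.discard st2.2.1 node, st2.2.2)

def find_cycles (graph : List (String × List String)) : List (List String) :=
  let fuel := graph.length + (graph.map (fun p => p.2.length)).sum + 2
  (graph.foldl (fun st p => dfsA graph fuel p.1 [] st)
    (PySem.Set.empty, PySem.Set.empty, [])).2.2

def check (tasks : List (String × List String)) :
    (List (String × List String)) × (List (String × List String)) ×
    (List (String × List (String × Int))) × List (List String) :=
  let circular_tasks := find_cycles tasks
  let td := PySem.Dict.mk tasks
  let res := tasks.foldl
    (fun (acc : PySem.Dict String (PySem.Set String) ×
                PySem.Dict String (PySem.Set (String × Int))) p =>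
      p.2.foldl (fun acc dp =>
        let acc1 :=
          if ¬ td.contains dp then
            (acc.1.modify p.1 PySem.Set.empty (fun s => PySem.Set.add s dp), acc.2)
          else acc
        if PySem.List.count p.2 dp > 1 then
          (acc1.1, acc1.2.modify p.1 PySem.Set.empty
            (fun s => PySem.Set.add s (dp, (PySem.List.count p.2 dp : Int))))
        else acc1) acc)
    (PySem.Dict.empty, PySem.Dict.empty)
  -- {k: set(v) for k, v in …}
  (tasks,
   res.1.items.map (fun q => (q.1, PySem.Set.ofList q.2)),
   res.2.items.map (fun q => (q.1, PySem.Set.ofList q.2)),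
   circular_tasks)

-- ===== PORT B =====
-- the explicit stack frames of Source B: ("enter", node, path) / ("leave", node, None)
inductive PvFrame
  | enter : String → List String → PvFrame
  | leave : String → PvFrame
deriving DecidableEq, Repr

-- the `while stack:` loop of Source B. Python's list stack (append/pop at the end) is
-- modelled head-as-top, so pushing reversed(graph[node]) then popping yields the
-- neighbors in order: the pushes become `nbs.map … ++ leave :: rest`.
-- fuel is a totality device only, consumed on the node-expansion branch alone; the
-- fuel chosen in find_cycles_alt exceeds the number of possible expansions, so the
-- 0-branch is never taken on the inputs run.
def runB (graph : List (String × List String)) :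
    Nat → List PvFrame →
    (PySem.Set String × PySem.Set String × List (List String)) →
    PySem.Set String × PySem.Set String × List (List String)
  | _, [], st => st
  | fuel, PvFrame.leave n :: rest, st =>
      runB graph fuel rest (st.1, PySem.Set.discard st.2.1 n, st.2.2)
  | fuel, PvFrame.enter n p :: rest, st =>
      if PySem.Set.contains st.2.1 n then
        runB graph fuel rest (st.1, st.2.1, st.2.2 ++ [p ++ [n]])
      else if PySem.Set.contains st.1 n then
        runB graph fuel rest st
      else
        match fuel with
        | 0 => st
        | fuel + 1 =>
          let st1 := (PySem.Set.add st.1 n, PySem.Set.add st.2.1 n, st.2.2)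
          let frames :=
            match (PySem.Dict.mk graph).get? n with
            | some nbs => nbs.map (fun nb => PvFrame.enter nb (p ++ [n]))
            | none => []
          runB graph fuel (frames ++ PvFrame.leave n :: rest) st1
termination_by fuel stack _ => (fuel, stack.length)
decreasing_by
  · exact Prod.Lex.right _ (by simp only [List.length_cons]; omega)
  · exact Prod.Lex.right _ (by simp only [List.length_cons]; omega)
  · exact Prod.Lex.right _ (by simp only [List.length_cons]; omega)
  · exact Prod.Lex.left _ _ (by omega)

def find_cycles_alt (graph : List (String × List String)) : List (List String) :=
  let fuel := graph.length + (graph.map (fun p => p.2.length)).sum + 2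
  (graph.foldl (fun st p => runB graph fuel [PvFrame.enter p.1 []] st)
    (PySem.Set.empty, PySem.Set.empty, [])).2.2

def check_alt (tasks : List (String × List String)) :
    (List (String × List String)) × (List (String × List String)) ×
    (List (String × List (String × Int))) × List (List String) :=
  let td := PySem.Dict.mk tasks
  -- counts = {t: Counter(deps) …}; then staged comprehensions filtered on non-emptiness
  let counts := tasks.map (fun p => (p.1, PySem.Dict.counter p.2))
  let non_deps := (counts.map (fun q =>
      (q.1, PySem.Set.ofList (q.2.keys.filter (fun d => ¬ td.contains d))))).filter
      (fun q => decide (q.2 ≠ []))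
  let dups := (counts.map (fun q =>
      (q.1, PySem.Set.ofList (q.2.items.filter (fun r => r.2 > 1))))).filter
      (fun q => decide (q.2 ≠ []))
  (tasks, non_deps, dups, find_cycles_alt tasks)

-- ===== PRECONDITION & SPEC =====
-- Pre_ excludes association lists with duplicate keys: they do not represent a Python
-- dict input (Python would collapse the duplicates before check ever runs).
def Pre_check (tasks : List (String × List String)) : Prop :=
  (tasks.map Prod.fst).Nodup
instance (tasks : List (String × List String)) : Decidable (Pre_check tasks) := by
  unfold Pre_check; infer_instance

def pvWitness_check : (List (String × List String)) :=
  [("a", ["b", "b", "x"]), ("b", ["a"]), ("c", [])]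

def Spec_check (tasks : List (String × List String)) (out : (List (String × List String)) × (List (String × List String)) × (List (String × List (String × Int))) × List (List String)) : Prop := out = check_alt tasks
instance (tasks : List (String × List String)) (out : (List (String × List String)) × (List (String × List String)) × (List (String × List (String × Int))) × List (List String)) : Decidable (Spec_check tasks out) := by
  unfold Spec_check
  exact @instDecidableEqProd _ _ _ (@instDecidableEqProd _ _ _ (@instDecidableEqProd _ _ _ _)) _ _

-- ===== CLAIM (what is proved, stated in full; the proofs are below) =====
def Claim_equal_check : Prop := ∀ (tasks : List (String × List String)), Dom_check tasks → Pre_check tasks → Spec_check tasks (check tasks)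

-- ===== LEMMAS AND PROOFS =====

theorem pv_contains_eq {α : Type} [BEq α] [LawfulBEq α] (s : List α) (x : α) :
    s.contains x = decide (x ∈ s) := by
  by_cases h : x ∈ s <;> simp [h, List.contains_iff_mem]

theorem pv_add_eq {α : Type} [BEq α] [LawfulBEq α] (s : PySem.Set α) (x : α) :
    PySem.Set.add s x = if x ∈ s then s else s ++ [x] := by
  simp [PySem.Set.add, PySem.Set.contains, pv_contains_eq]

-- ---- cycles: universe of nodes and the remaining-count measure ----

def pvU (graph : List (String × List String)) : List String :=
  graph.flatMap (fun q => q.1 :: q.2)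

def pvRem (graph : List (String × List String)) (vis : List String) : Nat :=
  ((pvU graph).toFinset \ vis.toFinset).card

theorem pv_mem_U_of_get? (G : List (String × List String)) (n : String)
    (nbs : List String) (h : (PySem.Dict.mk G).get? n = some nbs) :
    ∀ x ∈ nbs, x ∈ pvU G := by
  intro x hx
  unfold PySem.Dict.get? at h
  cases hf : (PySem.Dict.mk G).items.find? (fun p => p.1 == n) with
  | none => rw [hf] at h; simp at h
  | some pr =>
    rw [hf] at h
    simp only [Option.map_some, Option.some.injEq] at h
    have hmem : pr ∈ (PySem.Dict.mk G).items := List.mem_of_find?_eq_some hf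
    exact List.mem_flatMap.mpr ⟨pr, hmem, by simp [h ▸ hx]⟩

theorem pv_rem_mono_of_subset (G : List (String × List String)) (a b : List String)
    (h : ∀ x ∈ a, x ∈ b) : pvRem G b ≤ pvRem G a := by
  apply Finset.card_le_card
  apply Finset.sdiff_subset_sdiff (Finset.Subset.refl _)
  intro x hx
  exact List.mem_toFinset.mpr (h x (List.mem_toFinset.mp hx))

theorem pv_rem_add (G : List (String × List String)) (vis : List String) (n : String)
    (hU : n ∈ pvU G) (hn : n ∉ vis) :
    pvRem G (PySem.Set.add vis n) + 1 = pvRem G vis := by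
  unfold pvRem
  rw [pv_add_eq, if_neg hn]
  have ht : (vis ++ [n]).toFinset = insert n vis.toFinset := by
    ext x; simp [or_comm]
  rw [ht, Finset.sdiff_insert]
  have hmem : n ∈ (pvU G).toFinset \ vis.toFinset := by
    simp [List.mem_toFinset, hU, hn]
  rw [Finset.card_erase_of_mem hmem]
  have : 0 < ((pvU G).toFinset \ vis.toFinset).card := Finset.card_pos.mpr ⟨n, hmem⟩
  omega

theorem pv_dfsA_mono (G : List (String × List String)) :
    ∀ (g : Nat) (n : String) (p : List String)
      (st : PySem.Set String × PySem.Set String × List (List String)) (x : String),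
      x ∈ st.1 → x ∈ (dfsA G g n p st).1 := by
  intro g
  induction g with
  | zero => intro n p st x hx; exact hx
  | succ g ih =>
    intro n p st x hx
    simp only [dfsA]
    split_ifs with h1 h2
    · exact hx
    · exact hx
    · have hfold : ∀ (nbs : List String)
          (st' : PySem.Set String × PySem.Set String × List (List String)),
          x ∈ st'.1 → x ∈ (nbs.foldl (fun s nb => dfsA G g nb (p ++ [n]) s) st').1 := by
        intro nbs
        induction nbs with
        | nil => intro st' h; exact h
        | cons nb nbs ihn =>
          intro st' h
          exact ihn _ (ih nb (p ++ [n]) st' x h)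
      have hx1 : x ∈ PySem.Set.add st.1 n := by
        rw [pv_add_eq]; split_ifs <;> simp [hx]
      cases hg : (PySem.Dict.mk G).get? n with
      | none => simpa [hg] using hx1
      | some nbs => simpa [hg] using hfold nbs (PySem.Set.add st.1 n, PySem.Set.add st.2.1 n, st.2.2) hx1

theorem runB_nil (G : List (String × List String)) (f : Nat)
    (st : PySem.Set String × PySem.Set String × List (List String)) :
    runB G f [] st = st := by
  rw [runB.eq_def]

theorem runB_leave (G : List (String × List String)) (f : Nat) (n : String)
    (rest : List PvFrame)
    (st : PySem.Set String × PySem.Set String × List (List String)) :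
    runB G f (PvFrame.leave n :: rest) st
      = runB G f rest (st.1, PySem.Set.discard st.2.1 n, st.2.2) := by
  rw [runB.eq_def]

theorem runB_enter_rec (G : List (String × List String)) (f : Nat) (n : String)
    (p : List String) (rest : List PvFrame)
    (st : PySem.Set String × PySem.Set String × List (List String))
    (h : PySem.Set.contains st.2.1 n = true) :
    runB G f (PvFrame.enter n p :: rest) st
      = runB G f rest (st.1, st.2.1, st.2.2 ++ [p ++ [n]]) := by
  rw [runB.eq_def]
  simp only [h, if_true]

theorem runB_enter_vis (G : List (String × List String)) (f : Nat) (n : String)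
    (p : List String) (rest : List PvFrame)
    (st : PySem.Set String × PySem.Set String × List (List String))
    (h1 : PySem.Set.contains st.2.1 n = false)
    (h2 : PySem.Set.contains st.1 n = true) :
    runB G f (PvFrame.enter n p :: rest) st = runB G f rest st := by
  rw [runB.eq_def]
  simp only [h1, Bool.false_eq_true, if_false, h2, if_true]

theorem runB_enter_new (G : List (String × List String)) (f0 : Nat) (n : String)
    (p : List String) (rest : List PvFrame)
    (st : PySem.Set String × PySem.Set String × List (List String))
    (h1 : PySem.Set.contains st.2.1 n = false)
    (h2 : PySem.Set.contains st.1 n = false) :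
    runB G (f0 + 1) (PvFrame.enter n p :: rest) st
      = runB G f0
          ((match (PySem.Dict.mk G).get? n with
            | some nbs => nbs.map (fun nb => PvFrame.enter nb (p ++ [n]))
            | none => []) ++ PvFrame.leave n :: rest)
          (PySem.Set.add st.1 n, PySem.Set.add st.2.1 n, st.2.2) := by
  rw [runB.eq_def]
  simp only [h1, Bool.false_eq_true, if_false, h2]

-- simulation: the frame machine runs one enter frame exactly like one dfsA call
theorem pv_sim (G : List (String × List String)) :
    ∀ (g f : Nat) (n : String) (p : List String) (rest : List PvFrame)
      (vis rec : PySem.Set String) (cyc : List (List String)),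
      n ∈ pvU G → pvRem G vis < f → pvRem G vis < g →
      ∃ f', pvRem G (dfsA G g n p (vis, rec, cyc)).1 < f' ∧
        runB G f (PvFrame.enter n p :: rest) (vis, rec, cyc)
          = runB G f' rest (dfsA G g n p (vis, rec, cyc)) := by
  intro g
  induction g with
  | zero => intro f n p rest vis rec cyc _ _ hg; omega
  | succ g ih =>
    intro f n p rest vis rec cyc hU hf hg
    by_cases h1 : PySem.Set.contains rec n = true
    · refine ⟨f, ?_, ?_⟩
      · simpa only [dfsA, h1, if_true] using hf
      · rw [runB_enter_rec G f n p rest (vis, rec, cyc) h1]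
        simp only [dfsA, h1, if_true]
    · have hb1 : PySem.Set.contains rec n = false := by simpa using h1
      by_cases h2 : PySem.Set.contains vis n = true
      · refine ⟨f, ?_, ?_⟩
        · simpa only [dfsA, hb1, h2, Bool.false_eq_true, if_false, if_true] using hf
        · rw [runB_enter_vis G f n p rest (vis, rec, cyc) hb1 h2]
          simp only [dfsA, hb1, h2, Bool.false_eq_true, if_false, if_true]
      · have hb2 : PySem.Set.contains vis n = false := by simpa using h2
        obtain ⟨f0, rfl⟩ : ∃ f0, f = f0 + 1 := ⟨f - 1, by omega⟩
        have hnvis : n ∉ vis := by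
          have hx := hb2
          rw [PySem.Set.contains, pv_contains_eq] at hx
          simpa using hx
        have hrem := pv_rem_add G vis n hU hnvis
        have hf0 : pvRem G (PySem.Set.add vis n) < f0 := by omega
        have hg' : pvRem G (PySem.Set.add vis n) < g := by omega
        have hdfs : dfsA G (g + 1) n p (vis, rec, cyc) =
            (let st2 :=
              match (PySem.Dict.mk G).get? n with
              | some nbs => nbs.foldl (fun s nb => dfsA G g nb (p ++ [n]) s)
                  (PySem.Set.add vis n, PySem.Set.add rec n, cyc)
              | none => (PySem.Set.add vis n, PySem.Set.add rec n, cyc)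
             (st2.1, PySem.Set.discard st2.2.1 n, st2.2.2)) := by
          simp only [dfsA, hb1, hb2, Bool.false_eq_true, if_false]
        have hinner : ∀ (nbs : List String), (∀ x ∈ nbs, x ∈ pvU G) →
            ∀ (f1 : Nat)
              (st' : PySem.Set String × PySem.Set String × List (List String))
              (tail : List PvFrame),
              pvRem G st'.1 < f1 → pvRem G st'.1 < g →
              ∃ f2,
                pvRem G (nbs.foldl (fun s nb => dfsA G g nb (p ++ [n]) s) st').1 < f2 ∧
                runB G f1 (nbs.map (fun nb => PvFrame.enter nb (p ++ [n])) ++ tail) st'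
                  = runB G f2 tail
                      (nbs.foldl (fun s nb => dfsA G g nb (p ++ [n]) s) st') := by
          intro nbs
          induction nbs with
          | nil => intro _ f1 st' tail hf1 _; exact ⟨f1, hf1, rfl⟩
          | cons nb nbs ihn =>
            intro hmem f1 st' tail hf1 hg1
            obtain ⟨a, b, c⟩ := st'
            obtain ⟨fm, hfm, heq⟩ := ih f1 nb (p ++ [n])
              (nbs.map (fun nb => PvFrame.enter nb (p ++ [n])) ++ tail) a b c
              (hmem nb (by simp)) hf1 hg1
            have hmono : pvRem G (dfsA G g nb (p ++ [n]) (a, b, c)).1 ≤ pvRem G a :=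
              pv_rem_mono_of_subset G a (dfsA G g nb (p ++ [n]) (a, b, c)).1
                (fun x hx => pv_dfsA_mono G g nb (p ++ [n]) (a, b, c) x hx)
            obtain ⟨f2, hf2, heq2⟩ := ihn
              (fun x hx => hmem x (by simp [hx])) fm
              (dfsA G g nb (p ++ [n]) (a, b, c)) tail hfm
              (lt_of_le_of_lt hmono hg1)
            refine ⟨f2, by simpa using hf2, ?_⟩
            simp only [List.map_cons, List.cons_append]
            rw [heq, heq2]
            simp only [List.foldl_cons]
        cases hget : (PySem.Dict.mk G).get? n with
        | none =>
          rw [hget] at hdfs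
          dsimp only at hdfs
          refine ⟨f0, ?_, ?_⟩
          · rw [hdfs]; exact hf0
          · rw [runB_enter_new G f0 n p rest (vis, rec, cyc) hb1 hb2]
            simp only [hget, List.nil_append]
            rw [runB_leave, hdfs]
        | some nbs =>
          rw [hget] at hdfs
          dsimp only at hdfs
          obtain ⟨f2, hf2, heq⟩ := hinner nbs (pv_mem_U_of_get? G n nbs hget) f0
            (PySem.Set.add vis n, PySem.Set.add rec n, cyc)
            (PvFrame.leave n :: rest) hf0 hg'
          refine ⟨f2, ?_, ?_⟩
          · rw [hdfs]; exact hf2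
          · rw [runB_enter_new G f0 n p rest (vis, rec, cyc) hb1 hb2]
            simp only [hget]
            rw [heq, runB_leave, hdfs]

theorem pv_len_U (g : List (String × List String)) :
    (pvU g).length = g.length + (g.map (fun p => p.2.length)).sum := by
  induction g with
  | nil => rfl
  | cons p g ih =>
    simp only [pvU, List.flatMap_cons, List.length_append, List.length_cons,
      List.map_cons, List.sum_cons] at ih ⊢
    omega

theorem pv_rem_lt (g : List (String × List String)) (vis : List String) :
    pvRem g vis < g.length + (g.map (fun p => p.2.length)).sum + 2 := by
  have h1 : pvRem g vis ≤ (pvU g).toFinset.card :=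
    Finset.card_le_card Finset.sdiff_subset
  have h2 : (pvU g).toFinset.card ≤ (pvU g).length := List.toFinset_card_le _
  have h3 := pv_len_U g
  omega

theorem pv_cycles_fold (g : List (String × List String)) (F : Nat)
    (hF : ∀ vis, pvRem g vis < F) :
    ∀ (ps : List (String × List String)), (∀ p ∈ ps, p ∈ g) →
      ∀ (vis rec : PySem.Set String) (cyc : List (List String)),
      ps.foldl (fun st p => runB g F [PvFrame.enter p.1 []] st) (vis, rec, cyc)
        = ps.foldl (fun st p => dfsA g F p.1 [] st) (vis, rec, cyc) := by
  intro ps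
  induction ps with
  | nil => intro _ vis rec cyc; rfl
  | cons p ps ihp =>
    intro hmem vis rec cyc
    simp only [List.foldl_cons]
    have hU : p.1 ∈ pvU g := List.mem_flatMap.mpr ⟨p, hmem p (by simp), by simp⟩
    obtain ⟨f', _, heq⟩ := pv_sim g F F p.1 [] [] vis rec cyc hU (hF vis) (hF vis)
    rw [heq]
    have hnil : runB g f' [] (dfsA g F p.1 [] (vis, rec, cyc))
        = dfsA g F p.1 [] (vis, rec, cyc) := runB_nil g f' _
    rw [hnil]
    obtain ⟨a, b, c⟩ := dfsA g F p.1 [] (vis, rec, cyc)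
    exact ihp (fun q hq => hmem q (by simp [hq])) a b c

theorem pv_cycles_eq (g : List (String × List String)) :
    find_cycles g = find_cycles_alt g := by
  have h := pv_cycles_fold g (g.length + (g.map (fun p => p.2.length)).sum + 2)
    (fun vis => pv_rem_lt g vis) g (fun p hp => hp) PySem.Set.empty PySem.Set.empty []
  show (List.foldl
      (fun st p => dfsA g (g.length + (List.map (fun p => p.2.length) g).sum + 2) p.1 [] st)
      (PySem.Set.empty, PySem.Set.empty, []) g).2.2
    = (List.foldl
      (fun st p => runB g (g.length + (List.map (fun p => p.2.length) g).sum + 2)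
        [PvFrame.enter p.1 []] st)
      (PySem.Set.empty, PySem.Set.empty, []) g).2.2
  rw [h]

-- ---- check: sets built by Counter / staged passes ----

-- S2 core
theorem pv_foldl_add_nodup {α : Type} [BEq α] [LawfulBEq α] :
    ∀ (l : List α) (s : PySem.Set α), l.Nodup → (∀ x ∈ l, x ∉ s) →
      l.foldl PySem.Set.add s = s ++ l := by
  intro l
  induction l with
  | nil => intro s _ _; simp
  | cons x xs ih =>
    intro s hnd hdisj
    simp only [List.foldl_cons]
    rw [pv_add_eq]
    rw [if_neg (hdisj x (by simp))]
    rw [ih (s ++ [x]) hnd.of_cons]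
    · simp
    · intro y hy
      simp only [List.mem_append, List.mem_singleton]
      push_neg
      exact ⟨fun h => hdisj y (by simp [hy]) h, fun h => (List.nodup_cons.mp hnd).1 (h ▸ hy)⟩

theorem pv_ofList_nodup {α : Type} [BEq α] [LawfulBEq α] (l : List α) (h : l.Nodup) :
    PySem.Set.ofList l = l := by
  rw [PySem.Set.ofList_eq_foldl]
  simpa using pv_foldl_add_nodup l [] h (by simp)

-- S1 core
theorem pv_filter_add {α : Type} [BEq α] [LawfulBEq α] (p : α → Bool) (s : PySem.Set α) (x : α) :
    (PySem.Set.add s x).filter p =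
      if p x then PySem.Set.add (s.filter p) x else s.filter p := by
  rw [pv_add_eq]
  by_cases hm : x ∈ s
  · rw [if_pos hm]
    by_cases hp : p x
    · rw [if_pos hp, pv_add_eq, if_pos (by simp [List.mem_filter, hm, hp])]
    · rw [if_neg hp]
  · rw [if_neg hm, List.filter_append]
    by_cases hp : p x
    · rw [if_pos hp, pv_add_eq, if_neg (by simp [List.mem_filter, hm])]
      simp [hp]
    · simp [hp]

theorem pv_filter_foldl_add {α : Type} [BEq α] [LawfulBEq α] (p : α → Bool) :
    ∀ (l : List α) (s : PySem.Set α),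
      (l.foldl PySem.Set.add s).filter p = (l.filter p).foldl PySem.Set.add (s.filter p) := by
  intro l
  induction l with
  | nil => intro s; simp
  | cons x xs ih =>
    intro s
    simp only [List.foldl_cons, List.filter_cons]
    rw [ih, pv_filter_add]
    by_cases hp : p x <;> simp [hp]

theorem pv_ofList_filter {α : Type} [BEq α] [LawfulBEq α] (p : α → Bool) (l : List α) :
    (PySem.Set.ofList l).filter p = PySem.Set.ofList (l.filter p) := by
  rw [PySem.Set.ofList_eq_foldl, PySem.Set.ofList_eq_foldl, pv_filter_foldl_add]
  rfl

-- S3 core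
theorem pv_map_foldl_add {α β : Type} [BEq α] [LawfulBEq α] [BEq β] [LawfulBEq β]
    (g : α → β) (hg : Function.Injective g) :
    ∀ (l : List α) (s : PySem.Set α),
      (l.foldl PySem.Set.add s).map g = (l.map g).foldl PySem.Set.add (s.map g) := by
  intro l
  induction l with
  | nil => intro s; simp
  | cons x xs ih =>
    intro s
    simp only [List.foldl_cons, List.map_cons]
    rw [ih]
    congr 1
    rw [pv_add_eq, pv_add_eq]
    by_cases hm : x ∈ s
    · rw [if_pos hm, if_pos (List.mem_map_of_mem hm)]
    · have hnm : ¬ g x ∈ s.map g := by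
        intro hmem
        obtain ⟨y, hy, hxy⟩ := List.mem_map.mp hmem
        exact hm (by rw [← hg hxy]; exact hy)
      rw [if_neg hm, if_neg hnm, List.map_append]
      simp

theorem pv_ofList_map {α β : Type} [BEq α] [LawfulBEq α] [BEq β] [LawfulBEq β]
    (g : α → β) (hg : Function.Injective g) (l : List α) :
    PySem.Set.ofList (l.map g) = (PySem.Set.ofList l).map g := by
  rw [PySem.Set.ofList_eq_foldl, PySem.Set.ofList_eq_foldl, pv_map_foldl_add g hg]
  rfl

theorem pv_ofList_eq_nil_iff {α : Type} [BEq α] [LawfulBEq α] (l : List α) :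
    PySem.Set.ofList l = [] ↔ l = [] := by
  constructor
  · intro h
    rw [List.eq_nil_iff_forall_not_mem]
    intro x hx
    have := (PySem.Set.mem_ofList l x).mpr hx
    simp [h] at this
  · intro h; subst h; rfl

-- Dict helpers
theorem pv_dict_contains_iff {κ ν : Type} [BEq κ] [LawfulBEq κ] (d : PySem.Dict κ ν) (k : κ) :
    d.contains k = true ↔ k ∈ d.keys := by
  unfold PySem.Dict.contains PySem.Dict.keys
  rw [List.any_eq_true]
  constructor
  · rintro ⟨p, hp, he⟩
    exact List.mem_map.mpr ⟨p, hp, by simpa using he⟩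
  · intro hk
    obtain ⟨p, hp, he⟩ := List.mem_map.mp hk
    exact ⟨p, hp, by simp [he]⟩

theorem pv_contains_false_forall {κ ν : Type} [BEq κ] [LawfulBEq κ] (d : PySem.Dict κ ν) (k : κ)
    (h : d.contains k = false) : ∀ p ∈ d.items, (p.1 == k) = false := by
  intro p hp
  simpa using List.any_eq_false.mp h p hp

theorem pv_get?_of_not_contains {κ ν : Type} [BEq κ] [LawfulBEq κ] (d : PySem.Dict κ ν) (k : κ)
    (h : d.contains k = false) : d.get? k = none := by
  unfold PySem.Dict.get?
  rw [Option.map_eq_none_iff, List.find?_eq_none]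
  intro p hp
  simp [pv_contains_false_forall d k h p hp]

theorem pv_insert_absent {κ ν : Type} [BEq κ] [LawfulBEq κ] (d : PySem.Dict κ ν) (k : κ)
    (v : ν) (h : d.contains k = false) :
    d.insert k v = PySem.Dict.mk (d.items ++ [(k, v)]) := by
  unfold PySem.Dict.insert
  rw [if_neg (by simp [h])]

theorem pv_insert_insert_self {κ ν : Type} [BEq κ] [LawfulBEq κ] (d : PySem.Dict κ ν) (k : κ)
    (v w : ν) : (d.insert k v).insert k w = d.insert k w := by
  by_cases h : d.contains k = true
  · obtain ⟨p0, hp0, he0⟩ := List.any_eq_true.mp h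
    unfold PySem.Dict.insert
    rw [if_pos h]
    have hc : ((PySem.Dict.mk (d.items.map (fun p => if (p.1 == k) then (k, v) else p))).contains k) = true := by
      apply List.any_eq_true.mpr
      refine ⟨(k, v), List.mem_map.mpr ⟨p0, hp0, by simp [he0]⟩, by simp⟩
    rw [if_pos hc, if_pos h]
    congr 1
    simp only [PySem.Dict.items, List.map_map]
    apply List.map_congr_left
    intro p _
    by_cases hp : (p.1 == k) = true <;> simp [hp]
  · have hb : d.contains k = false := by simpa using h
    have hall := pv_contains_false_forall d k hb
    rw [pv_insert_absent d k v hb, pv_insert_absent d k w hb]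
    have hc : ((PySem.Dict.mk (d.items ++ [(k, v)])).contains k) = true := by
      apply List.any_eq_true.mpr
      exact ⟨(k, v), by simp, by simp⟩
    unfold PySem.Dict.insert
    rw [if_pos hc]
    congr 1
    simp only [PySem.Dict.items, List.map_append]
    congr 1
    · rw [show d.items = d.items.map id by simp]
      rw [List.map_map]
      apply List.map_congr_left
      intro p hp
      simp [hall p hp]
    · simp

theorem pv_modify_modify {κ ν : Type} [BEq κ] [LawfulBEq κ] (d : PySem.Dict κ ν)
    (k : κ) (d0 : ν) (f g : ν → ν) :
    (d.modify k d0 g).modify k d0 f = d.modify k d0 (fun v => f (g v)) := by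
  classical
  unfold PySem.Dict.modify
  rw [show (d.insert k (g (d.getD k d0))).getD k d0 = g (d.getD k d0) from PySem.Dict.getD_insert_self d k (g (d.getD k d0)) d0]
  exact pv_insert_insert_self d k _ _

theorem pv_modify_absent {κ ν : Type} [BEq κ] [LawfulBEq κ] (d : PySem.Dict κ ν) (k : κ)
    (d0 : ν) (f : ν → ν) (h : d.contains k = false) :
    d.modify k d0 f = PySem.Dict.mk (d.items ++ [(k, f d0)]) := by
  unfold PySem.Dict.modify
  rw [PySem.Dict.getD, pv_get?_of_not_contains d k h]
  unfold PySem.Dict.insert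
  rw [if_neg (by simp [h])]
  simp

theorem pv_fold_modify_present {κ α β : Type} [BEq κ] [LawfulBEq κ] [BEq β]
    (t : κ) (g : α → β) :
    ∀ (xs : List α) (d : PySem.Dict κ (PySem.Set β)) (f0 : PySem.Set β → PySem.Set β),
      xs.foldl (fun d x => d.modify t PySem.Set.empty (fun s => PySem.Set.add s (g x)))
          (d.modify t PySem.Set.empty f0)
        = d.modify t PySem.Set.empty
            (fun s => PySem.Set.update (f0 s) (xs.map g)) := by
  intro xs
  induction xs with
  | nil => intro d f0; rfl
  | cons x xs ih =>
    intro d f0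
    simp only [List.foldl_cons]
    rw [pv_modify_modify]
    exact ih d (fun s => PySem.Set.add (f0 s) (g x))

theorem pv_fold_modify_eq {κ α β : Type} [BEq κ] [LawfulBEq κ] [BEq β] [DecidableEq α]
    (t : κ) (c : α → Bool) (g : α → β) (l : List α) (d : PySem.Dict κ (PySem.Set β))
    (h : d.contains t = false) :
    l.foldl (fun d x => if c x then d.modify t PySem.Set.empty (fun s => PySem.Set.add s (g x)) else d) d =
      if l.filter c = [] then d
      else d.insert t (PySem.Set.ofList ((l.filter c).map g)) := by
  rw [← List.foldl_filter]
  cases hbs : l.filter c with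
  | nil => simp
  | cons x xs =>
    rw [if_neg (by simp)]
    simp only [List.foldl_cons]
    rw [show xs.foldl (fun d x => d.modify t PySem.Set.empty (fun s => PySem.Set.add s (g x)))
          (d.modify t PySem.Set.empty (fun s => PySem.Set.add s (g x)))
        = d.modify t PySem.Set.empty
            (fun s => PySem.Set.update (PySem.Set.add s (g x)) (xs.map g))
      from pv_fold_modify_present t g xs d _]
    rw [pv_modify_absent d t _ _ h, pv_insert_absent d t _ h]
    rfl

theorem pv_foldl_pair {α β γ : Type} (F : β → α → β) (G : γ → α → γ) :
    ∀ (l : List α) (b : β) (c : γ),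
      l.foldl (fun acc x => (F acc.1 x, G acc.2 x)) (b, c) = (l.foldl F b, l.foldl G c) := by
  intro l
  induction l with
  | nil => intro b c; rfl
  | cons x xs ih => intro b c; simp only [List.foldl_cons]; exact ih _ _

theorem pv_vn_insert {κ β : Type} [BEq κ] (d : PySem.Dict κ (PySem.Set β)) (k : κ)
    (v : PySem.Set β) (hd : ∀ q ∈ d.items, q.2.Nodup) (hv : v.Nodup) :
    ∀ q ∈ (d.insert k v).items, q.2.Nodup := by
  intro q hq
  unfold PySem.Dict.insert at hq
  by_cases h : d.contains k = true
  · rw [if_pos h] at hq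
    simp only [PySem.Dict.items] at hq
    obtain ⟨p, hp, he⟩ := List.mem_map.mp hq
    by_cases hpk : (p.1 == k) = true
    · rw [if_pos hpk] at he; rw [← he]; exact hv
    · rw [if_neg hpk] at he; rw [← he]; exact hd p hp
  · rw [if_neg h] at hq
    simp only [List.mem_append] at hq
    rcases hq with hq | hq
    · exact hd q hq
    · simp at hq; rw [hq]; exact hv

theorem pv_contains_insert_false {κ ν : Type} [BEq κ] [LawfulBEq κ] (d : PySem.Dict κ ν)
    (k k' : κ) (v : ν) (h : d.contains k' = false) (hne : k' ≠ k) :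
    (d.insert k v).contains k' = false := by
  by_contra hc
  have hc' : (d.insert k v).contains k' = true := by simpa using hc
  rcases (PySem.Dict.mem_keys_insert d k k' v).mp ((pv_dict_contains_iff _ k').mp hc') with he | hm
  · exact hne he
  · rw [(pv_dict_contains_iff d k').mpr hm] at h
    exact Bool.true_eq_false.mp h

theorem pv_ite_insert_contains {κ ν : Type} [BEq κ] [LawfulBEq κ] (d : PySem.Dict κ ν)
    (k k' : κ) (v : ν) (c : Prop) [Decidable c] (h : d.contains k' = false) (hne : k' ≠ k) :
    (if c then d.insert k v else d).contains k' = false := by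
  split_ifs
  · exact pv_contains_insert_false d k k' v h hne
  · exact h

theorem pv_ite_insert_vn {κ β : Type} [BEq κ] (d : PySem.Dict κ (PySem.Set β)) (k : κ)
    (v : PySem.Set β) (c : Prop) [Decidable c] (hd : ∀ q ∈ d.items, q.2.Nodup)
    (hv : v.Nodup) : ∀ q ∈ (if c then d.insert k v else d).items, q.2.Nodup := by
  split_ifs
  · exact pv_vn_insert d k v hd hv
  · exact hd

theorem pv_map_ofList_id {β : Type} [BEq β] [LawfulBEq β] (l : List (String × PySem.Set β))
    (h : ∀ q ∈ l, q.2.Nodup) :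
    l.map (fun q => (q.1, PySem.Set.ofList q.2)) = l := by
  induction l with
  | nil => rfl
  | cons q l ih =>
    simp only [List.map_cons]
    rw [pv_ofList_nodup q.2 (h q (by simp)), ih (fun q hq => h q (by simp [hq]))]

theorem pv_fold_modify_eq' {κ α β : Type} [BEq κ] [LawfulBEq κ] [BEq β] [DecidableEq α]
    (t : κ) (c : α → Prop) [DecidablePred c] (g : α → β) (l : List α)
    (d : PySem.Dict κ (PySem.Set β)) (h : d.contains t = false) :
    l.foldl (fun d x => if c x then d.modify t PySem.Set.empty (fun s => PySem.Set.add s (g x)) else d) d =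
      if l.filter (fun x => decide (c x)) = [] then d
      else d.insert t (PySem.Set.ofList ((l.filter (fun x => decide (c x))).map g)) := by
  have hfun : (fun (d : PySem.Dict κ (PySem.Set β)) x =>
      if c x then d.modify t PySem.Set.empty (fun s => PySem.Set.add s (g x)) else d) =
      (fun d x => if (fun x => decide (c x)) x = true then
        d.modify t PySem.Set.empty (fun s => PySem.Set.add s (g x)) else d) := by
    funext d x
    by_cases hc : c x <;> simp [hc]
  rw [hfun]
  exact pv_fold_modify_eq t (fun x => decide (c x)) g l d h

theorem pv_step_eq (td : PySem.Dict String (List String)) (t : String) (deps : List String)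
    (d1 : PySem.Dict String (PySem.Set String))
    (d2 : PySem.Dict String (PySem.Set (String × Int)))
    (h1 : d1.contains t = false) (h2 : d2.contains t = false) :
    (deps.foldl (fun (acc : PySem.Dict String (PySem.Set String) ×
                PySem.Dict String (PySem.Set (String × Int))) dp =>
        let acc1 :=
          if ¬ td.contains dp then
            (acc.1.modify t PySem.Set.empty (fun s => PySem.Set.add s dp), acc.2)
          else acc
        if PySem.List.count deps dp > 1 then
          (acc1.1, acc1.2.modify t PySem.Set.empty
            (fun s => PySem.Set.add s (dp, (PySem.List.count deps dp : Int))))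
        else acc1) (d1, d2)) =
    (let cnt := PySem.Dict.counter deps
     let bad := PySem.Set.ofList (cnt.keys.filter (fun d => ¬ td.contains d))
     let acc1 := if bad ≠ [] then d1.insert t bad else d1
     let dups := PySem.Set.ofList (cnt.items.filter (fun q => q.2 > 1))
     let acc2 := if dups ≠ [] then d2.insert t dups else d2
     (acc1, acc2)) := by
  have hg : Function.Injective (fun k : String => (k, (List.count k deps : Int))) := by
    intro a b hab
    exact (Prod.ext_iff.mp hab).1
  have hsplit : (fun (acc : PySem.Dict String (PySem.Set String) ×
                PySem.Dict String (PySem.Set (String × Int))) dp =>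
        let acc1 :=
          if ¬ td.contains dp then
            (acc.1.modify t PySem.Set.empty (fun s => PySem.Set.add s dp), acc.2)
          else acc
        if PySem.List.count deps dp > 1 then
          (acc1.1, acc1.2.modify t PySem.Set.empty
            (fun s => PySem.Set.add s (dp, (PySem.List.count deps dp : Int))))
        else acc1) =
      (fun acc dp =>
        ((fun (a : PySem.Dict String (PySem.Set String)) dp =>
            if ¬ td.contains dp then
              a.modify t PySem.Set.empty (fun s => PySem.Set.add s dp) else a) acc.1 dp,
         (fun (b : PySem.Dict String (PySem.Set (String × Int))) dp =>
            if PySem.List.count deps dp > 1 then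
              b.modify t PySem.Set.empty
                (fun s => PySem.Set.add s (dp, (PySem.List.count deps dp : Int))) else b) acc.2 dp)) := by
    funext acc dp
    dsimp only
    split_ifs <;> rfl
  rw [hsplit]
  rw [pv_foldl_pair
    (fun (a : PySem.Dict String (PySem.Set String)) dp =>
      if ¬ td.contains dp then
        a.modify t PySem.Set.empty (fun s => PySem.Set.add s dp) else a)
    (fun (b : PySem.Dict String (PySem.Set (String × Int))) dp =>
      if PySem.List.count deps dp > 1 then
        b.modify t PySem.Set.empty
          (fun s => PySem.Set.add s (dp, (PySem.List.count deps dp : Int))) else b)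
    deps d1 d2]
  rw [pv_fold_modify_eq' t _ _ deps d1 h1, pv_fold_modify_eq' t _ _ deps d2 h2]
  dsimp only
  rw [PySem.Dict.keys_counter, PySem.Dict.items_counter]
  rw [List.filter_map]
  have hc2 : ((fun (q : String × Int) => decide (q.2 > 1)) ∘
      (fun k : String => (k, (List.count k deps : Int)))) =
      (fun dp : String => decide (PySem.List.count deps dp > 1)) := by
    funext k
    simp only [Function.comp_apply]
    rw [decide_eq_decide, PySem.List.count_eq]
    exact_mod_cast Iff.rfl
  rw [hc2]
  rw [pv_ofList_filter, pv_ofList_filter]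
  rw [pv_ofList_nodup _ (PySem.Set.nodup_ofList _)]
  have hmapid : ∀ l : List String, l.map (fun dp => dp) = l := fun l => List.map_id' l
  have hgfun : (fun dp : String => (dp, (PySem.List.count deps dp : Int))) =
      (fun k : String => (k, (List.count k deps : Int))) := by
    funext dp; rw [PySem.List.count_eq]
  rw [hmapid, hgfun]
  simp only [pv_ofList_map _ hg]
  rw [pv_ofList_nodup (PySem.Set.ofList _) (PySem.Set.nodup_ofList _)]
  apply Prod.ext
  · by_cases hb1 : List.filter (fun x => decide (¬td.contains x = true)) deps = [] <;>
      simp only [hb1, ne_eq, pv_ofList_eq_nil_iff, not_true, not_false_eq_true,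
        ite_true, ite_false]
  · by_cases hb2 : List.filter (fun dp => decide (PySem.List.count deps dp > 1)) deps = [] <;>
      simp only [hb2, ne_eq, List.map_eq_nil_iff, pv_ofList_eq_nil_iff, not_true,
        not_false_eq_true, ite_true, ite_false]

theorem pv_outer (td : PySem.Dict String (List String)) :
    ∀ (ts : List (String × List String)) (d1 : PySem.Dict String (PySem.Set String))
      (d2 : PySem.Dict String (PySem.Set (String × Int))),
      (ts.map Prod.fst).Nodup →
      (∀ x ∈ ts, d1.contains x.1 = false ∧ d2.contains x.1 = false) →
      (∀ q ∈ d1.items, q.2.Nodup) → (∀ q ∈ d2.items, q.2.Nodup) →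
      (ts.foldl
          (fun (acc : PySem.Dict String (PySem.Set String) ×
                      PySem.Dict String (PySem.Set (String × Int))) p =>
            p.2.foldl (fun acc dp =>
              let acc1 :=
                if ¬ td.contains dp then
                  (acc.1.modify p.1 PySem.Set.empty (fun s => PySem.Set.add s dp), acc.2)
                else acc
              if PySem.List.count p.2 dp > 1 then
                (acc1.1, acc1.2.modify p.1 PySem.Set.empty
                  (fun s => PySem.Set.add s (dp, (PySem.List.count p.2 dp : Int))))
              else acc1) acc) (d1, d2) =
        ts.foldl
          (fun (acc : PySem.Dict String (PySem.Set String) ×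
                      PySem.Dict String (PySem.Set (String × Int))) p =>
            let cnt := PySem.Dict.counter p.2
            let bad := PySem.Set.ofList (cnt.keys.filter (fun d => ¬ td.contains d))
            let acc1 := if bad ≠ [] then acc.1.insert p.1 bad else acc.1
            let dups := PySem.Set.ofList (cnt.items.filter (fun q => q.2 > 1))
            let acc2 := if dups ≠ [] then acc.2.insert p.1 dups else acc.2
            (acc1, acc2)) (d1, d2)) ∧
      (∀ q ∈ (ts.foldl
          (fun (acc : PySem.Dict String (PySem.Set String) ×
                      PySem.Dict String (PySem.Set (String × Int))) p =>
            let cnt := PySem.Dict.counter p.2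
            let bad := PySem.Set.ofList (cnt.keys.filter (fun d => ¬ td.contains d))
            let acc1 := if bad ≠ [] then acc.1.insert p.1 bad else acc.1
            let dups := PySem.Set.ofList (cnt.items.filter (fun q => q.2 > 1))
            let acc2 := if dups ≠ [] then acc.2.insert p.1 dups else acc.2
            (acc1, acc2)) (d1, d2)).1.items, q.2.Nodup) ∧
      (∀ q ∈ (ts.foldl
          (fun (acc : PySem.Dict String (PySem.Set String) ×
                      PySem.Dict String (PySem.Set (String × Int))) p =>
            let cnt := PySem.Dict.counter p.2
            let bad := PySem.Set.ofList (cnt.keys.filter (fun d => ¬ td.contains d))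
            let acc1 := if bad ≠ [] then acc.1.insert p.1 bad else acc.1
            let dups := PySem.Set.ofList (cnt.items.filter (fun q => q.2 > 1))
            let acc2 := if dups ≠ [] then acc.2.insert p.1 dups else acc.2
            (acc1, acc2)) (d1, d2)).2.items, q.2.Nodup) := by
  intro ts
  induction ts with
  | nil =>
    intro d1 d2 _ _ hv1 hv2
    exact ⟨rfl, hv1, hv2⟩
  | cons p ts ih =>
    obtain ⟨t, deps⟩ := p
    intro d1 d2 hnd hfresh hv1 hv2
    have hft := hfresh (t, deps) (by simp)
    simp only [List.foldl_cons]
    rw [pv_step_eq td t deps d1 d2 hft.1 hft.2]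
    dsimp only
    have hne : ∀ x ∈ ts, x.1 ≠ t := by
      intro x hx
      have : t ∉ List.map Prod.fst ts := (List.nodup_cons.mp hnd).1
      intro he
      exact this (he ▸ (List.mem_map.mpr ⟨x, hx, rfl⟩))
    refine ih _ _ (List.nodup_cons.mp hnd).2 ?_ ?_ ?_
    · intro x hx
      exact ⟨pv_ite_insert_contains d1 t x.1 _ _ (hfresh x (by simp [hx])).1 (hne x hx),
             pv_ite_insert_contains d2 t x.1 _ _ (hfresh x (by simp [hx])).2 (hne x hx)⟩
    · exact pv_ite_insert_vn d1 t _ _ hv1 (PySem.Set.nodup_ofList _)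
    · exact pv_ite_insert_vn d2 t _ _ hv2 (PySem.Set.nodup_ofList _)

def pvV1 (tasks : List (String × List String)) (p : String × List String) :
    PySem.Set String :=
  PySem.Set.ofList ((PySem.Dict.counter p.2).keys.filter
    (fun d => ¬ (PySem.Dict.mk tasks).contains d))

def pvV2 (p : String × List String) : PySem.Set (String × Int) :=
  PySem.Set.ofList ((PySem.Dict.counter p.2).items.filter (fun q => q.2 > 1))

def pvF1 (tasks : List (String × List String))
    (a : PySem.Dict String (PySem.Set String)) (p : String × List String) :
    PySem.Dict String (PySem.Set String) :=
  if pvV1 tasks p ≠ [] then a.insert p.1 (pvV1 tasks p) else a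

def pvF2 (b : PySem.Dict String (PySem.Set (String × Int))) (p : String × List String) :
    PySem.Dict String (PySem.Set (String × Int)) :=
  if pvV2 p ≠ [] then b.insert p.1 (pvV2 p) else b

-- items of the insert-if-nonempty fold = the staged map-then-filter list
theorem pv_items_fold {ν : Type} (v : (String × List String) → ν)
    (c : (String × List String) → Prop) [DecidablePred c] :
    ∀ (ts : List (String × List String)) (d : PySem.Dict String ν),
      (ts.map Prod.fst).Nodup → (∀ x ∈ ts, d.contains x.1 = false) →
      (ts.foldl (fun acc p => if c p then acc.insert p.1 (v p) else acc) d).items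
        = d.items ++ (ts.filter (fun p => decide (c p))).map (fun p => (p.1, v p)) := by
  intro ts
  induction ts with
  | nil => intro d _ _; simp
  | cons p ts ih =>
    intro d hnd hfresh
    have hne : ∀ x ∈ ts, x.1 ≠ p.1 := by
      intro x hx
      have : p.1 ∉ List.map Prod.fst ts := (List.nodup_cons.mp hnd).1
      intro he
      exact this (he ▸ (List.mem_map.mpr ⟨x, hx, rfl⟩))
    simp only [List.foldl_cons, List.filter_cons]
    by_cases hc : c p
    · rw [if_pos hc]
      rw [ih (d.insert p.1 (v p)) (List.nodup_cons.mp hnd).2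
        (fun x hx => pv_contains_insert_false d p.1 x.1 _ (hfresh x (by simp [hx])) (hne x hx))]
      rw [pv_insert_absent d p.1 (v p) (hfresh p (by simp))]
      simp [hc, PySem.Dict.items]
    · rw [if_neg hc]
      rw [ih d (List.nodup_cons.mp hnd).2 (fun x hx => hfresh x (by simp [hx]))]
      simp [hc]

-- ===== VERDICT (by name: the statement is the Claim_ definition above) =====
theorem check_spec : Claim_equal_check := by
  intro tasks _hdom hpre
  unfold Spec_check check check_alt
  dsimp only
  obtain ⟨hAB, hv1, hv2⟩ := pv_outer (PySem.Dict.mk tasks) tasks PySem.Dict.empty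
    PySem.Dict.empty hpre (fun x _ => ⟨rfl, rfl⟩) (fun q hq => by cases hq)
    (fun q hq => by cases hq)
  rw [hAB]
  have hsplit' : (fun (acc : PySem.Dict String (PySem.Set String) ×
                      PySem.Dict String (PySem.Set (String × Int))) (p : String × List String) =>
            let cnt := PySem.Dict.counter p.2
            let bad := PySem.Set.ofList (cnt.keys.filter (fun d => ¬ (PySem.Dict.mk tasks).contains d))
            let acc1 := if bad ≠ [] then acc.1.insert p.1 bad else acc.1
            let dups := PySem.Set.ofList (cnt.items.filter (fun q => q.2 > 1))
            let acc2 := if dups ≠ [] then acc.2.insert p.1 dups else acc.2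
            (acc1, acc2)) =
        (fun acc p => (pvF1 tasks acc.1 p, pvF2 acc.2 p)) := by
    funext acc p
    simp only [pvF1, pvF2, pvV1, pvV2]
  rw [hsplit'] at hv1 hv2 ⊢
  rw [pv_foldl_pair (pvF1 tasks) pvF2 tasks PySem.Dict.empty PySem.Dict.empty] at hv1 hv2 ⊢
  dsimp only at hv1 hv2 ⊢
  have h1 : (tasks.foldl (pvF1 tasks) PySem.Dict.empty).items
      = (PySem.Dict.empty (κ := String) (ν := PySem.Set String)).items ++
        (tasks.filter (fun p => decide (pvV1 tasks p ≠ []))).map (fun p => (p.1, pvV1 tasks p)) :=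
    pv_items_fold (pvV1 tasks) (fun p => pvV1 tasks p ≠ []) tasks PySem.Dict.empty hpre
      (fun x _ => rfl)
  have h2 : (tasks.foldl pvF2 PySem.Dict.empty).items
      = (PySem.Dict.empty (κ := String) (ν := PySem.Set (String × Int))).items ++
        (tasks.filter (fun p => decide (pvV2 p ≠ []))).map (fun p => (p.1, pvV2 p)) :=
    pv_items_fold pvV2 (fun p => pvV2 p ≠ []) tasks PySem.Dict.empty hpre
      (fun x _ => rfl)
  rw [pv_map_ofList_id _ hv1, pv_map_ofList_id _ hv2, h1, h2]
  simp only [List.map_map, List.filter_map]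
  refine Prod.ext rfl (Prod.ext ?_ (Prod.ext ?_ (pv_cycles_eq tasks)))
  · simp only [List.nil_append]; rfl
  · simp only [List.nil_append]; rfl
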